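-- pv_equiv track=rewrite | github.com/SHRMu/DL4NLP | Exercise05/main.py | N_gram_processing
-- ===== SOURCE A (Python) =====
-- def N_gram_processing(poem, n):
--   N_gram_data=[]
--   N_gram_label=[]
--   for i in range(len(poem)-n):
--     N_gram = poem[i:i+n+1]
--     N_gram_data.append(tuple(N_gram[:-1]))
--     N_gram_label.append(N_gram[-1])
--   return N_gram_data, N_gram_label
-- ===== SOURCE B (Python) =====
-- def N_gram_processing(poem, n):
--     if n < 0 or n >= len(poem):
--         return [], []
--     # Transpose shifted views of the sequence: row i = (poem[i], ..., poem[i+n]).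
--     rows = list(zip(*(poem[j:] for j in range(n + 1))))
--     N_gram_data = [r[:-1] for r in rows]
--     N_gram_label = [r[-1] for r in rows]
--     return N_gram_data, N_gram_label
-- ===== Notes on version B (the rewrite author's own statement) =====
-- stated objective: idiomatic
-- what changed: Replaces the explicit index-slicing loop with a zip-transpose of the n+1 shifted views poem[j:], then splits each zipped row into its context prefix and last-element label.
import Mathlib
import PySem

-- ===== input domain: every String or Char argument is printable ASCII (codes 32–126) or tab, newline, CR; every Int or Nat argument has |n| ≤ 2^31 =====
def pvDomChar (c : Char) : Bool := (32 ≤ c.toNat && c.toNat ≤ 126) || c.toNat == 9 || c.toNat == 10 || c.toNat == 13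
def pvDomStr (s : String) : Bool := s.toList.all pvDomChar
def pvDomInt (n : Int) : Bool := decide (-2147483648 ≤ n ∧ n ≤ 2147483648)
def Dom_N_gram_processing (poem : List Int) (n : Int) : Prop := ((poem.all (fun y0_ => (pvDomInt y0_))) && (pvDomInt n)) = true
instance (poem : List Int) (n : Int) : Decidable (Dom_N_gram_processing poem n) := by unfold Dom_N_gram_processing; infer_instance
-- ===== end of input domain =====

-- B re-implements the sliding-window loop as a zip-transpose of n+1 shifted views (idiomatic; same cost).

-- ===== PORT A =====
-- for i in range(len(poem)-n): N_gram = poem[i:i+n+1]; data.append(tuple(N_gram[:-1])); label.append(N_gram[-1])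
-- N_gram[-1] raises IndexError on an empty slice (any n < 0): excluded by Pre_; pyGetD's default is never used inside Pre_.
def N_gram_processing (poem : List Int) (n : Int) : List (List Int) × List Int :=
  (PySem.List.pyRange 0 ((poem.length : Int) - n) 1).foldl
    (fun (acc : List (List Int) × List Int) i =>
      let ng := PySem.List.slice poem (some i) (some (i + n + 1))
      (acc.1 ++ [PySem.List.slice ng none (some (-1))],
       acc.2 ++ [PySem.List.pyGetD ng (-1) 0]))
    ([], [])

-- ===== PORT B =====
-- Hand port of Python's variadic zip(*iterables), exact: stops at the shortest iterable,
-- and zip of zero iterables is empty. Structural recursion on the first iterable.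
def zipRows1 : List Int → List (List Int) → List (List Int)
  | [], _ => []
  | x :: xs, rest =>
    if rest.all (fun l => !l.isEmpty) then
      (x :: rest.map (fun l => l.headI)) :: zipRows1 xs (rest.map List.tail)
    else []

def zipRows : List (List Int) → List (List Int)
  | [] => []
  | l :: rest => zipRows1 l rest

-- if n < 0 or n >= len(poem): return [], []  (nothing to zip: fewer than one full window)
-- rows = list(zip(*(poem[j:] for j in range(n+1)))); return [r[:-1] for r in rows], [r[-1] for r in rows]
def N_gram_processing_alt (poem : List Int) (n : Int) : List (List Int) × List Int :=
  if n < 0 ∨ (poem.length : Int) ≤ n then ([], []) else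
  let rows := zipRows ((PySem.List.pyRange 0 (n + 1) 1).map
      (fun j => PySem.List.slice poem (some j) none))
  (rows.map (fun r => PySem.List.slice r none (some (-1))),
   rows.map (fun r => PySem.List.pyGetD r (-1) 0))

-- ===== PRECONDITION & SPEC =====
-- Pre_ excludes n < 0, on which A always raises IndexError (the window slice poem[i:i+n+1] is empty at i = len(poem), and that i is always reached).
def Pre_N_gram_processing (poem : List Int) (n : Int) : Prop := 0 ≤ n
instance (poem : List Int) (n : Int) : Decidable (Pre_N_gram_processing poem n) := by
  unfold Pre_N_gram_processing; infer_instance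
def pvWitness_N_gram_processing : List Int × Int := ([1, 2, 3, 4], 2)

def Spec_N_gram_processing (poem : List Int) (n : Int) (out : List (List Int) × List Int) : Prop := out = N_gram_processing_alt poem n
instance (poem : List Int) (n : Int) (out : List (List Int) × List Int) : Decidable (Spec_N_gram_processing poem n out) := by unfold Spec_N_gram_processing; infer_instance

-- ===== CLAIM (what is proved, stated in full; the proofs are below) =====
def Claim_equal_N_gram_processing : Prop := ∀ (poem : List Int) (n : Int), Dom_N_gram_processing poem n → Pre_N_gram_processing poem n → Spec_N_gram_processing poem n (N_gram_processing poem n)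

-- ===== LEMMAS AND PROOFS =====

theorem headI_eq_getD (l : List Int) : l.headI = l.getD 0 0 := by cases l <;> simp

theorem tail_getD (l : List Int) (i : Nat) : l.tail.getD i 0 = l.getD (i + 1) 0 := by
  cases l <;> simp

-- zip of lists all of length ≥ m, one of length exactly m: row i collects entry i of every list
theorem zipRows1_eq (m : Nat) : ∀ (first : List Int) (rest : List (List Int)),
    (∀ l ∈ first :: rest, m ≤ l.length) → (∃ l ∈ first :: rest, l.length = m) →
    zipRows1 first rest =
      (List.range m).map (fun i => (first :: rest).map (fun l => l.getD i 0)) := by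
  induction m with
  | zero =>
    intro first rest hall hex
    obtain ⟨l, hl, hlen⟩ := hex
    have hnil : l = [] := List.eq_nil_of_length_eq_zero hlen
    subst hnil
    simp only [List.range_zero, List.map_nil]
    rcases List.mem_cons.mp hl with h | h
    · rw [← h]; rfl
    · cases first with
      | nil => rfl
      | cons x xs =>
        rw [zipRows1, if_neg]
        intro hc
        have := List.all_eq_true.mp hc [] h
        simp at this
  | succ m ih =>
    intro first rest hall hex
    cases first with
    | nil => exact absurd (hall [] (List.mem_cons_self)) (by simp)
    | cons x xs =>
      have hrest : rest.all (fun l => !l.isEmpty) = true := by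
        apply List.all_eq_true.mpr
        intro l hl
        have := hall l (List.mem_cons_of_mem _ hl)
        cases l with
        | nil => simp at this
        | cons a as => simp
      rw [zipRows1, if_pos hrest]
      have ihe := ih xs (rest.map List.tail)
        (by
          intro l' hl'
          rcases List.mem_cons.mp hl' with h | h
          · have h2 := hall (x :: xs) (List.mem_cons_self)
            simp only [List.length_cons] at h2
            subst h
            omega
          · obtain ⟨l, hl, rfl⟩ := List.mem_map.mp h
            have := hall l (List.mem_cons_of_mem _ hl)
            cases l with
            | nil => simp at this
            | cons a as =>
              simp only [List.length_cons] at this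
              simp only [List.tail_cons]
              omega)
        (by
          obtain ⟨l, hl, hlen⟩ := hex
          rcases List.mem_cons.mp hl with h | h
          · subst h
            simp only [List.length_cons] at hlen
            exact ⟨xs, List.mem_cons_self, by omega⟩
          · refine ⟨l.tail, List.mem_cons_of_mem _ (List.mem_map.mpr ⟨l, h, rfl⟩), ?_⟩
            cases l with
            | nil => simp at hlen
            | cons a as =>
              simp only [List.length_cons] at hlen
              simp only [List.tail_cons]
              omega)
      rw [ihe, List.range_succ_eq_map, List.map_cons, List.map_map]
      congr 1
      · simp only [List.map_cons, List.getD_cons_zero]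
        exact congrArg _ (List.map_congr_left (fun l _ => headI_eq_getD l))
      · apply List.map_congr_left
        intro i _
        simp only [Nat.succ_eq_add_one, List.map_cons, List.map_map,
          Function.comp, List.getD_cons_succ]
        exact congrArg _ (List.map_congr_left (fun l _ => tail_getD l i))

-- B's shifted views poem[j:] for j in range(k+1), as dropped suffixes
theorem views_eq (poem : List Int) (k : Nat) :
    (PySem.List.pyRange 0 ((k : Int) + 1) 1).map (fun j => PySem.List.slice poem (some j) none) =
      (List.range (k + 1)).map (fun t => poem.drop t) := by
  have h1 : ((k : Int) + 1) = ((k + 1 : Nat) : Int) := by push_cast; ring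
  rw [h1, PySem.List.pyRange_one, List.map_map]
  have h2 : (((k + 1 : Nat) : Int) - 0).toNat = k + 1 := by omega
  rw [h2]
  apply List.map_congr_left
  intro t _
  simp only [Function.comp, Int.zero_add]
  exact PySem.List.slice_from_natCast poem t

theorem rows_eq (poem : List Int) (k : Nat) :
    zipRows ((List.range (k + 1)).map (fun t => poem.drop t)) =
      (List.range (poem.length - k)).map
        (fun i => (List.range (k + 1)).map (fun t => (poem.drop t).getD i 0)) := by
  have hcons : (List.range (k + 1)).map (fun t => poem.drop t) =
      poem :: (List.range k).map (fun t => poem.drop (t + 1)) := by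
    rw [List.range_succ_eq_map, List.map_cons, List.map_map]
    simp [Function.comp]
  rw [hcons]
  show zipRows1 poem _ = _
  rw [zipRows1_eq (poem.length - k) poem ((List.range k).map (fun t => poem.drop (t + 1)))]
  · rw [← hcons]
    simp [Function.comp]
  · intro l hl
    rcases List.mem_cons.mp hl with h | h
    · subst h; omega
    · obtain ⟨t, ht, rfl⟩ := List.mem_map.mp h
      have := List.mem_range.mp ht
      simp only [List.length_drop]
      omega
  · rcases Nat.eq_zero_or_pos k with hk | hk
    · exact ⟨poem, List.mem_cons_self, by omega⟩
    · refine ⟨poem.drop k, List.mem_cons_of_mem _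
        (List.mem_map.mpr ⟨k - 1, List.mem_range.mpr (by omega), by congr 1; omega⟩), by simp⟩

-- the window poem[i:i+k+1] equals column i of the k+1 shifted views
theorem ng_eq (poem : List Int) (k i : Nat) (h : i + (k + 1) ≤ poem.length) :
    PySem.List.slice poem (some (i : Int)) (some ((i : Int) + (k : Int) + 1)) =
      (List.range (k + 1)).map (fun t => (poem.drop t).getD i 0) := by
  have hcast : (i : Int) + (k : Int) + 1 = (i : Int) + ((k + 1 : Nat) : Int) := by push_cast; ring
  rw [hcast, PySem.List.slice_natCast_add]
  apply List.ext_getElem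
  · simp; omega
  · intro t h1 h2
    simp only [List.getElem_take, List.getElem_drop, List.getElem_map, List.getElem_range]
    have h1' : t < k + 1 := by simpa using h2
    have hi : i < (poem.drop t).length := by simp; omega
    rw [List.getD_eq_getElem _ _ hi, List.getElem_drop]
    congr 1
    omega

-- ===== VERDICT (by name: the statement is the Claim_ definition above) =====
theorem N_gram_processing_spec : Claim_equal_N_gram_processing := by
  intro poem n _ hpre
  unfold Spec_N_gram_processing
  obtain ⟨k, rfl⟩ : ∃ k : Nat, n = (k : Int) := ⟨n.toNat, (Int.toNat_of_nonneg hpre).symm⟩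
  by_cases hbig : ((poem.length : Int) ≤ (k : Int))
  · simp only [N_gram_processing, N_gram_processing_alt, if_pos (Or.inr hbig)]
    rw [PySem.List.pyRange_one]
    have h0 : ((poem.length : Int) - (k : Int) - 0).toNat = 0 := by omega
    rw [h0]
    simp
  · simp only [N_gram_processing, N_gram_processing_alt,
      if_neg (by omega : ¬((k : Int) < 0 ∨ (poem.length : Int) ≤ (k : Int)))]
    rw [views_eq poem k, rows_eq poem k, List.map_map, List.map_map]
    rw [PySem.List.pyRange_one]
    have hm : (((poem.length : Int) - (k : Int) - 0).toNat) = poem.length - k := by omega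
    rw [hm]
    rw [PySem.List.foldl_prod_mk
        (fun (s : List (List Int)) (e : Int) =>
          s ++ [PySem.List.slice (PySem.List.slice poem (some e) (some (e + (k : Int) + 1))) none (some (-1))])
        (fun (s : List Int) (e : Int) =>
          s ++ [PySem.List.pyGetD (PySem.List.slice poem (some e) (some (e + (k : Int) + 1))) (-1) 0])]
    rw [PySem.List.foldl_append_singleton_eq_map, PySem.List.foldl_append_singleton_eq_map]
    simp only [List.nil_append, List.map_map]
    refine Prod.ext ?_ ?_
    · apply List.map_congr_left
      intro i hi
      have hi' : i < poem.length - k := List.mem_range.mp hi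
      simp only [Function.comp, Int.zero_add]
      rw [ng_eq poem k i (by omega)]
    · apply List.map_congr_left
      intro i hi
      have hi' : i < poem.length - k := List.mem_range.mp hi
      simp only [Function.comp, Int.zero_add]
      rw [ng_eq poem k i (by omega)]
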